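-- pv_equiv track=rewrite | github.com/DYShin1/algorithm | 프로그래머스/0/181864. 문자열 바꿔서 찾기/문자열 바꿔서 찾기.py | solution
-- ===== SOURCE A (Python) =====
-- def solution(myString, pat):
--     answer = 0
--     tmp = ''
--     for i in pat:
--         if i == 'A':
--             tmp += 'B'
--         else:
--             tmp += 'A'
--     if tmp in myString:
--         answer = 1
--     else:
--         answer = 0
--     return answer
-- ===== SOURCE B (Python) =====
-- def solution(myString, pat):
--     tmp = ''.join('B' if c == 'A' else 'A' for c in pat)
--     s = myString
--     while True:
--         if s.startswith(tmp):
--             return 1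
--         if not s:
--             return 0
--         s = s[1:]
-- ===== Notes on version B (the rewrite author's own statement) =====
-- stated objective: alternative
-- what changed: B builds the swapped pattern with a single comprehension/map instead of repeated string concatenation and replaces the built-in 'in' substring test with an explicit sliding suffix scan using startswith.
import Mathlib
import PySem

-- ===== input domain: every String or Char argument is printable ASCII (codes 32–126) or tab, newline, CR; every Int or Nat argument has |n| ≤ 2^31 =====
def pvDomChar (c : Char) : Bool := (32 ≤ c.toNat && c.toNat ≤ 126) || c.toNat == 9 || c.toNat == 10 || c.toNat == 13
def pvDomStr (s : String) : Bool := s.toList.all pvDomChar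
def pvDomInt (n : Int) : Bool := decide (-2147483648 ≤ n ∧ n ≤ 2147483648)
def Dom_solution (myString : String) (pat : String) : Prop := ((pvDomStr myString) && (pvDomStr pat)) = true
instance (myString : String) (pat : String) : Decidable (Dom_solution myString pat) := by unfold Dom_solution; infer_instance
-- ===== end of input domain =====

-- B swaps the pattern with one map and searches by an explicit suffix scan instead of 'in' (alternative decomposition, same result).

-- ===== PORT A =====
def solution (myString : String) (pat : String) : Int :=
  -- answer = 0; tmp built by appending 'B' for 'A' and 'A' otherwise; then 'tmp in myString'
  let tmp : List Char :=
    pat.toList.foldl (fun acc i => acc ++ (if i == 'A' then ['B'] else ['A'])) []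
  if PySem.Chars.isIn tmp myString.toList then 1 else 0

-- ===== PORT B =====
-- B's loop: if s.startswith(tmp) return 1; if s empty return 0; else drop the first char
def scanB (tmp : List Char) : List Char → Bool
  | [] => PySem.Chars.startswith [] tmp
  | a :: t => PySem.Chars.startswith (a :: t) tmp || scanB tmp t

def solution_alt (myString : String) (pat : String) : Int :=
  let tmp : List Char := pat.toList.map (fun c => if c == 'A' then 'B' else 'A')
  if scanB tmp myString.toList then 1 else 0

-- ===== PRECONDITION & SPEC =====
def Spec_solution (myString : String) (pat : String) (out : Int) : Prop := out = solution_alt myString pat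
instance (myString : String) (pat : String) (out : Int) : Decidable (Spec_solution myString pat out) := by unfold Spec_solution; infer_instance

-- ===== CLAIM (what is proved, stated in full; the proofs are below) =====
def Claim_equal_solution : Prop := ∀ (myString : String) (pat : String), Dom_solution myString pat → Spec_solution myString pat (solution myString pat)

-- ===== LEMMAS AND PROOFS =====
theorem scanB_eq_isIn (tmp s : List Char) : scanB tmp s = PySem.Chars.isIn tmp s := by
  induction s with
  | nil =>
    rw [Bool.eq_iff_iff]
    simp [scanB, PySem.Chars.startswith_iff, PySem.Chars.isIn_iff_infix]
  | cons a t ih =>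
    rw [Bool.eq_iff_iff]
    simp [scanB, PySem.Chars.startswith_iff, PySem.Chars.isIn_iff_infix, ih,
      List.infix_cons_iff]

theorem tmp_eq (pat : List Char) :
    pat.foldl (fun acc i => acc ++ (if i == 'A' then ['B'] else ['A'])) [] =
      pat.map (fun c => if c == 'A' then 'B' else 'A') := by
  have h := PySem.List.foldl_append_singleton_eq_map
    (f := fun c => if c == 'A' then 'B' else 'A') (l := pat) (acc := ([] : List Char))
  simpa [apply_ite (fun c => ([c] : List Char))] using h

-- ===== VERDICT (by name: the statement is the Claim_ definition above) =====
theorem solution_spec : Claim_equal_solution := by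
  intro myString pat _
  simp only [Spec_solution, solution, solution_alt, tmp_eq, scanB_eq_isIn]
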